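-- pv_equiv track=rewrite | github.com/DaLaZh91/Text-Data-Analysis | functions.py | gevoFinden
-- ===== SOURCE A (Python) =====
-- def delPunct(schreiben):
--     # überprüft
--     '''
--     löscht punctuation aus dem Schreiben
--
--     Inputs:     schreiben - NICHT tokenisiertes schreiben
--
--     Outputs:    schreiben ohne punctuation
--
--     '''
--     punctuation = list('!"#$%&\'()*+,-./:;<=>?@[\\]^_`{|}~€°’‘“—«”£„‘©®»‚‚')
--     token_punctless =[token for token in schreiben if token not in punctuation]
--     token_punctless = ''.join(token_punctless)
--     return token_punctless
--
-- def gevoFinden(schreiben, k_words, nk_words, pos = 'K', neg = 'N'):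
--     '''
--     sucht nach den Wörtern, die eine Kündigung beschreiben und sortiert so in
--     Kündigung und keine Kündigung
--
--     Inputs:     schreiben - nicht tokenisiertes Dokument
--
--     Outputs:    dok_Gevo - 'K' oder 'N', je nachdem ob Kündigung oder nicht
--     '''
--     schreiben_lower = delPunct(schreiben).lower()
--     dok = schreiben_lower.split()
--     dok_bigram = [' '.join(b) for l in [' '.join(dok)] for b in zip(l.split(' ')[:-1], l.split(' ')[1:])]
--     dok_GeVo = []
--
--     if nk_words == []:
--         if any(map(lambda v: v in k_words, dok)):
--             dok_GeVo = pos
--         elif any(map(lambda v: v in k_words, dok_bigram)):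
--             dok_GeVo = pos
--         else:
--             dok_GeVo = neg
--     else:
--         if any(map(lambda v: v in nk_words, dok)):
--             dok_GeVo = neg
--         elif any(map(lambda v: v in nk_words, dok_bigram)):
--             dok_GeVo = neg
--         elif any(map(lambda v: v in k_words, dok)):
--              dok_GeVo = pos
--         elif any(map(lambda v: v in k_words, dok_bigram)):
--             dok_GeVo = pos
--         else:
--             dok_GeVo = neg
--
--     return(dok_GeVo)
-- ===== SOURCE B (Python) =====
-- def delPunct(schreiben):
--     punctuation = list('!"#$%&\'()*+,-./:;<=>?@[\\]^_`{|}~€°’‘“—«”£„‘©®»‚‚')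
--     token_punctless = [token for token in schreiben if token not in punctuation]
--     token_punctless = ''.join(token_punctless)
--     return token_punctless
--
-- def gevoFinden(schreiben, k_words, nk_words, pos='K', neg='N'):
--     # One streaming pass: walk the words once, forming each bigram on the fly
--     # from the previous word, and keep only the maximum "severity" seen:
--     # 2 = cancellation-blocking (nk) hit, 1 = cancellation (k) hit, 0 = nothing.
--     words = delPunct(schreiben).lower().split()
--     verdict = 0
--     prev = None
--     for w in words:
--         terms = [w] if prev is None else [w, prev + ' ' + w]
--         for t in terms:
--             rank = 2 if t in nk_words else 1 if t in k_words else 0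
--             verdict = max(verdict, rank)
--         prev = w
--     return pos if verdict == 1 else neg
-- ===== Notes on version B (the rewrite author's own statement) =====
-- stated objective: alternative
-- what changed: Replaces the staged four-branch any/map cascade over precomputed unigram and join/split-reconstructed bigram lists by a single streaming pass that forms each bigram on the fly from the previous word and folds a max-severity accumulator (2 = nk hit, 1 = k hit, 0 = none), mapping the final severity to the label.
import Mathlib
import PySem

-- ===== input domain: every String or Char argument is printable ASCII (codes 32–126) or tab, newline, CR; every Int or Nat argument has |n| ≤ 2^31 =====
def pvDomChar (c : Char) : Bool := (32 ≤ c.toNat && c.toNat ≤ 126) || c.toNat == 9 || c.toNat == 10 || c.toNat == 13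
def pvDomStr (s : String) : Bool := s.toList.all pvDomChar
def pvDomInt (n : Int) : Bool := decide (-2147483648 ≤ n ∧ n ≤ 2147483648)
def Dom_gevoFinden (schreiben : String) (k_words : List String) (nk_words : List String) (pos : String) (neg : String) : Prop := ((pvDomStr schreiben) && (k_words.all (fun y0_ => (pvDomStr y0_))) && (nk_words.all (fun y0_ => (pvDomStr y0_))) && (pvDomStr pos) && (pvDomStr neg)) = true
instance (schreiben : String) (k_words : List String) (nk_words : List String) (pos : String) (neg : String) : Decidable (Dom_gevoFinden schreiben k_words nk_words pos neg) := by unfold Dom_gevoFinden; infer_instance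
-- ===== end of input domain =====

-- B replaces A's staged any/map cascade over precomputed unigram and join/split bigram lists by a
-- single streaming pass forming bigrams on the fly and folding a max-severity accumulator.

-- ===== PORT A =====
-- shared module helper (identical in Source A and Source B)
def delPunct (schreiben : String) : String :=
  String.ofList (schreiben.toList.filter
    (fun token => !("!\"#$%&'()*+,-./:;<=>?@[\\]^_`{|}~€°’‘“—«”£„‘©®»‚‚".toList.contains token)))

def gevoFinden (schreiben : String) (k_words : List String) (nk_words : List String) (pos : String) (neg : String) : String :=
  let schreiben_lower := PySem.Str.lower (delPunct schreiben)
  let dok := PySem.Str.split₀ schreiben_lower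
  let dok_bigram := [PySem.Str.join " " dok].flatMap (fun l =>
    ((PySem.List.slice ((PySem.Str.split? l " ").getD []) none (some (-1))).zip
       (PySem.List.slice ((PySem.Str.split? l " ").getD []) (some 1) none)).map
      (fun b => PySem.Str.join " " [b.1, b.2]))
  if nk_words = [] then
    if dok.any (fun v => k_words.contains v) then pos
    else if dok_bigram.any (fun v => k_words.contains v) then pos
    else neg
  else
    if dok.any (fun v => nk_words.contains v) then neg
    else if dok_bigram.any (fun v => nk_words.contains v) then neg
    else if dok.any (fun v => k_words.contains v) then pos
    else if dok_bigram.any (fun v => k_words.contains v) then pos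
    else neg

-- ===== PORT B =====
-- Source B's rank expression: 2 if t in nk_words else 1 if t in k_words else 0
def pvRank (k_words nk_words : List String) (t : String) : Nat :=
  if nk_words.contains t then 2 else if k_words.contains t then 1 else 0

def gevoFinden_alt (schreiben : String) (k_words : List String) (nk_words : List String) (pos : String) (neg : String) : String :=
  let words := PySem.Str.split₀ (PySem.Str.lower (delPunct schreiben))
  let st := words.foldl
    (fun (s : Nat × Option String) w =>
      let terms := match s.2 with
        | none => [w]
        | some p => [w, p ++ " " ++ w]
      (terms.foldl (fun v t => max v (pvRank k_words nk_words t)) s.1, some w))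
    (0, none)
  if st.1 = 1 then pos else neg

-- ===== PRECONDITION & SPEC =====
def Spec_gevoFinden (schreiben : String) (k_words : List String) (nk_words : List String) (pos : String) (neg : String) (out : String) : Prop := out = gevoFinden_alt schreiben k_words nk_words pos neg
instance (schreiben : String) (k_words : List String) (nk_words : List String) (pos : String) (neg : String) (out : String) : Decidable (Spec_gevoFinden schreiben k_words nk_words pos neg out) := by unfold Spec_gevoFinden; infer_instance

-- ===== CLAIM (what is proved, stated in full; the proofs are below) =====
def Claim_equal_gevoFinden : Prop := ∀ (schreiben : String) (k_words : List String) (nk_words : List String) (pos : String) (neg : String), Dom_gevoFinden schreiben k_words nk_words pos neg → Spec_gevoFinden schreiben k_words nk_words pos neg (gevoFinden schreiben k_words nk_words pos neg)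

-- ===== LEMMAS AND PROOFS =====

-- splitOn.go stepping facts for the single-space separator
theorem pv_go_nil (fuel : Nat) (cur : List Char) (acc : List (List Char)) :
    PySem.Chars.splitOn.go [' '] fuel [] cur acc = (cur.reverse :: acc).reverse := by
  cases fuel <;> simp [PySem.Chars.splitOn.go]

theorem pv_go_cons (fuel : Nat) (c : Char) (rest cur : List Char) (acc : List (List Char)) (h : c ≠ ' ') :
    PySem.Chars.splitOn.go [' '] (fuel+1) (c :: rest) cur acc
      = PySem.Chars.splitOn.go [' '] fuel rest (c :: cur) acc := by
  rw [PySem.Chars.splitOn.go]; simp [List.isPrefixOf, Ne.symm h]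

theorem pv_go_sep (fuel : Nat) (rest cur : List Char) (acc : List (List Char)) :
    PySem.Chars.splitOn.go [' '] (fuel+1) (' ' :: rest) cur acc
      = PySem.Chars.splitOn.go [' '] fuel rest [] (cur.reverse :: acc) := by
  rw [PySem.Chars.splitOn.go]; simp [List.isPrefixOf]

-- consuming one space-free token
theorem pv_go_tok (w : List Char) (hw : ∀ c ∈ w, c ≠ ' ') :
    ∀ (fuel : Nat) (rest cur : List Char) (acc : List (List Char)),
    PySem.Chars.splitOn.go [' '] (fuel + w.length) (w ++ rest) cur acc
      = PySem.Chars.splitOn.go [' '] fuel rest (w.reverse ++ cur) acc := by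
  induction w with
  | nil => intro fuel rest cur acc; simp
  | cons c w ih =>
    intro fuel rest cur acc
    have h1 : fuel + (c :: w).length = (fuel + w.length) + 1 := by simp; omega
    rw [h1, List.cons_append, pv_go_cons _ _ _ _ _ (hw c (by simp))]
    rw [ih (fun x hx => hw x (by simp [hx])) fuel rest (c :: cur) acc]
    simp

-- splitting the space-joined token list recovers it
theorem pv_go_join (ws : List (List Char)) (hne : ws ≠ [])
    (hw : ∀ w ∈ ws, ∀ c ∈ w, c ≠ ' ') :
    ∀ (acc : List (List Char)) (fuel : Nat), (List.intercalate [' '] ws).length ≤ fuel →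
    PySem.Chars.splitOn.go [' '] fuel (List.intercalate [' '] ws) [] acc = acc.reverse ++ ws := by
  induction ws with
  | nil => exact absurd rfl hne
  | cons w tail ih =>
    intro acc fuel hfuel
    cases tail with
    | nil =>
      have hi : List.intercalate [' '] [w] = w := by simp [List.intercalate]
      rw [hi] at hfuel ⊢
      obtain ⟨f, rfl⟩ : ∃ f, fuel = f + w.length := ⟨fuel - w.length, by omega⟩
      have htok := pv_go_tok w (hw w (by simp)) f [] [] acc
      rw [List.append_nil] at htok
      rw [htok, pv_go_nil]; simp
    | cons y ys =>
      have hic : List.intercalate [' '] (w :: y :: ys) = w ++ ' ' :: List.intercalate [' '] (y :: ys) := by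
        simp [List.intercalate, List.intersperse]
      rw [hic] at hfuel ⊢
      have hlen : w.length + 1 + (List.intercalate [' '] (y :: ys)).length ≤ fuel := by
        simp at hfuel; omega
      obtain ⟨f, rfl⟩ : ∃ f, fuel = f + w.length := ⟨fuel - w.length, by omega⟩
      rw [pv_go_tok w (hw w (by simp)) f _ [] acc]
      obtain ⟨g, rfl⟩ : ∃ g, f = g + 1 := ⟨f - 1, by omega⟩
      rw [pv_go_sep]
      rw [ih (by simp) (fun x hx => hw x (by simp [hx])) _ g (by omega)]
      simp

theorem pv_splitOn_join (ws : List (List Char)) (hne : ws ≠ [])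
    (hw : ∀ w ∈ ws, ∀ c ∈ w, c ≠ ' ') :
    PySem.Chars.splitOn (PySem.Chars.join [' '] ws) [' '] = ws := by
  have := pv_go_join ws hne hw [] ((List.intercalate [' '] ws).length + 1) (by omega)
  simpa [PySem.Chars.splitOn, PySem.Chars.join] using this

-- split₀ produces nonempty tokens of non-whitespace characters
theorem pv_split0_go (s : List Char) :
    ∀ (cur : List Char) (acc : List (List Char)),
    (∀ w ∈ acc, w ≠ [] ∧ ∀ c ∈ w, PySem.Chars.isspace c = false) →
    (∀ c ∈ cur, PySem.Chars.isspace c = false) →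
    ∀ w ∈ PySem.Chars.split₀.go s cur acc, w ≠ [] ∧ ∀ c ∈ w, PySem.Chars.isspace c = false := by
  induction s with
  | nil =>
    intro cur acc hacc hcur w hwmem
    rw [PySem.Chars.split₀.go] at hwmem
    split at hwmem
    · exact hacc w (by simpa using hwmem)
    · rename_i hcurne
      simp only [List.mem_reverse, List.mem_cons] at hwmem
      rcases hwmem with rfl | hmem
      · refine ⟨by simpa [List.isEmpty_iff] using hcurne, ?_⟩
        intro c hc; exact hcur c (by simpa using hc)
      · exact hacc w hmem
  | cons c rest ih =>
    intro cur acc hacc hcur w hwmem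
    rw [PySem.Chars.split₀.go] at hwmem
    split at hwmem
    · split at hwmem
      · exact ih [] acc hacc (by simp) w hwmem
      · rename_i hcurne
        refine ih [] (cur.reverse :: acc) ?_ (by simp) w hwmem
        intro v hv
        rcases List.mem_cons.mp hv with rfl | hmem
        · refine ⟨by simpa [List.isEmpty_iff] using hcurne, ?_⟩
          intro x hx; exact hcur x (by simpa using hx)
        · exact hacc v hmem
    · rename_i hcsp
      refine ih (c :: cur) acc hacc ?_ w hwmem
      intro x hx
      rcases List.mem_cons.mp hx with rfl | hmem
      · simpa using hcsp
      · exact hcur x hmem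

theorem pv_split0_tokens (s : List Char) :
    ∀ w ∈ PySem.Chars.split₀ s, w ≠ [] ∧ ∀ c ∈ w, PySem.Chars.isspace c = false :=
  pv_split0_go s [] [] (by simp) (by simp)

theorem pv_zip_dropLast (xs : List String) :
    xs.dropLast.zip (xs.drop 1) = xs.zip (xs.drop 1) := by
  refine List.ext_getElem ?_ ?_
  · simp
  · intro i h1 h2
    simp only [List.getElem_zip, List.getElem_dropLast]

-- A's bigram construction equals the direct adjacent-pair construction
theorem pv_bigram_eq (s : String) :
    (let dok := PySem.Str.split₀ s;
     [PySem.Str.join " " dok].flatMap (fun l =>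
       ((PySem.List.slice ((PySem.Str.split? l " ").getD []) none (some (-1))).zip
          (PySem.List.slice ((PySem.Str.split? l " ").getD []) (some 1) none)).map
         (fun b => PySem.Str.join " " [b.1, b.2])))
    = (let dok := PySem.Str.split₀ s;
       (dok.zip (dok.drop 1)).map (fun p => p.1 ++ " " ++ p.2)) := by
  simp only [List.flatMap_cons, List.flatMap_nil, List.append_nil]
  by_cases hnil : PySem.Chars.split₀ s.toList = []
  · simp [PySem.Str.split₀, PySem.Str.join, PySem.Str.split?, PySem.Chars.split?, hnil]
    decide
  · have hsplit : PySem.Str.split? (PySem.Str.join " " (PySem.Str.split₀ s)) " "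
        = some (PySem.Str.split₀ s) := by
      have hchars : PySem.Chars.splitOn
          (PySem.Chars.join [' '] ((PySem.Chars.split₀ s.toList).map (fun w => (String.ofList w).toList)))
          [' '] = (PySem.Chars.split₀ s.toList).map (fun w => (String.ofList w).toList) := by
        apply pv_splitOn_join
        · simpa using hnil
        · intro w hw c hc
          simp only [List.mem_map] at hw
          obtain ⟨w0, hw0, rfl⟩ := hw
          have := (pv_split0_tokens s.toList w0 hw0).2 c (by simpa using hc)
          intro hcsp; rw [hcsp] at this; exact absurd this (by decide)
      simp only [PySem.Str.split?, PySem.Chars.split?, PySem.Str.join, PySem.Str.split₀]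
      simp only [List.map_map]
      simp only [show (" " : String).toList = [' '] from rfl, String.toList_ofList]
      rw [show ((fun x => x.toList) ∘ String.ofList : List Char → List Char) = fun w => (String.ofList w).toList from rfl]
      simp only [List.isEmpty_cons, Bool.false_eq_true, if_false, hchars, Option.map_some]
      congr 1
      simp
    rw [hsplit]
    simp only [Option.getD_some]
    have hs1 : ∀ (xs : List String), PySem.List.slice xs none (some (-1)) = xs.dropLast := by
      intro xs; simp [pysem]
    have hs2 : ∀ (xs : List String), PySem.List.slice xs (some 1) none = xs.drop 1 := by
      intro xs; simp [pysem]
    rw [hs1, hs2, pv_zip_dropLast]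
    apply List.map_congr_left
    intro p _
    apply String.ext
    simp [PySem.Str.join, PySem.Chars.join, List.intercalate, List.intersperse]

-- the stream of terms B examines, as one flat list
def pvTerms (prev : Option String) : List String → List String
  | [] => []
  | w :: ws => (match prev with | none => [w] | some p => [w, p ++ " " ++ w]) ++ pvTerms (some w) ws

-- the max-fold is a homomorphism in its start value
theorem pv_fold_hom (k nk : List String) (L : List String) :
    ∀ v : Nat, L.foldl (fun a t => max a (pvRank k nk t)) v
      = max v (L.foldl (fun a t => max a (pvRank k nk t)) 0) := by
  induction L with
  | nil => intro v; simp
  | cons t L ih =>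
    intro v
    simp only [List.foldl_cons]
    rw [ih (max v (pvRank k nk t)), ih (max 0 (pvRank k nk t))]
    omega

-- B's state fold computes the max-rank over the flattened term stream
theorem pv_fold_st (k nk : List String) (ws : List String) :
    ∀ (v : Nat) (prev : Option String),
    (ws.foldl
      (fun (s : Nat × Option String) w =>
        ((match s.2 with | none => [w] | some p => [w, p ++ " " ++ w]).foldl
          (fun v t => max v (pvRank k nk t)) s.1, some w))
      (v, prev)).1
      = (pvTerms prev ws).foldl (fun a t => max a (pvRank k nk t)) v := by
  induction ws with
  | nil => intro v prev; simp [pvTerms]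
  | cons w ws ih =>
    intro v prev
    simp only [List.foldl_cons, pvTerms, List.foldl_append]
    exact ih _ (some w)

-- any over the term stream = any over unigrams ‖ any over adjacent-pair bigrams
theorem pv_terms_any_aux (p : String → Bool) :
    ∀ (ws : List String) (pv : String),
    (pvTerms (some pv) ws).any p
      = (ws.any p || (((pv :: ws).zip ws).map (fun q => q.1 ++ " " ++ q.2)).any p) := by
  intro ws
  induction ws with
  | nil => intro pv; simp [pvTerms]
  | cons w ws ih =>
    intro pv
    simp only [pvTerms, List.any_append, List.any_cons, List.zip_cons_cons, List.map_cons,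
      List.any_nil, ih w]
    cases p w <;> cases p (pv ++ " " ++ w) <;> simp

theorem pv_terms_any (p : String → Bool) (ws : List String) :
    (pvTerms none ws).any p
      = (ws.any p || ((ws.zip (ws.drop 1)).map (fun q => q.1 ++ " " ++ q.2)).any p) := by
  cases ws with
  | nil => simp [pvTerms]
  | cons w ws =>
    simp only [pvTerms, List.any_append, List.any_cons, List.any_nil, pv_terms_any_aux p ws w,
      List.drop_succ_cons, List.drop_zero]
    cases p w <;> simp

-- the max-rank over a list, characterised by the two membership tests
theorem pv_g_char (k nk : List String) (L : List String) :
    L.foldl (fun a t => max a (pvRank k nk t)) 0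
      = if L.any (fun t => nk.contains t) then 2
        else if L.any (fun t => k.contains t) then 1 else 0 := by
  induction L with
  | nil => simp
  | cons t L ih =>
    simp only [List.foldl_cons, List.any_cons]
    rw [pv_fold_hom, ih]
    unfold pvRank
    simp only [List.any_eq_true, List.contains_eq_mem, decide_eq_true_eq, Bool.or_eq_true]
    by_cases h1 : t ∈ nk <;> by_cases h2 : t ∈ k <;>
      by_cases h3 : ∃ x ∈ L, x ∈ nk <;> by_cases h4 : ∃ x ∈ L, x ∈ k <;>
      simp [h1, h2, h3, h4]

-- ===== VERDICT (by name: the statement is the Claim_ definition above) =====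
set_option maxHeartbeats 2000000 in
theorem gevoFinden_spec : Claim_equal_gevoFinden := by
  intro schreiben k_words nk_words pos neg _
  unfold Spec_gevoFinden gevoFinden gevoFinden_alt
  simp only []
  rw [pv_bigram_eq (PySem.Str.lower (delPunct schreiben))]
  simp only []
  rw [pv_fold_st k_words nk_words]
  set dok := PySem.Str.split₀ (PySem.Str.lower (delPunct schreiben)) with hdok
  clear_value dok
  rw [pv_g_char]
  rw [pv_terms_any (fun t => nk_words.contains t), pv_terms_any (fun t => k_words.contains t)]
  set big := (dok.zip (dok.drop 1)).map (fun q => q.1 ++ " " ++ q.2) with hbig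
  clear_value big
  by_cases hnk : nk_words = []
  · subst hnk
    have e3 : (dok.any fun v => List.contains ([] : List String) v) = false := by simp
    have e4 : (big.any fun v => List.contains ([] : List String) v) = false := by simp
    cases h1 : (dok.any fun v => k_words.contains v) <;>
    cases h2 : (big.any fun v => k_words.contains v) <;>
    simp [h1, h2, e3, e4]
  · rw [if_neg hnk]
    cases h1 : (dok.any fun v => nk_words.contains v) <;>
    cases h2 : (big.any fun v => nk_words.contains v) <;>
    cases h3 : (dok.any fun v => k_words.contains v) <;>
    cases h4 : (big.any fun v => k_words.contains v) <;>
    simp [h1, h2, h3, h4]
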